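-- pv_equiv track=rewrite | github.com/doramirdor/getnadir.dev | backend/app/services/context_truncation.py | _extract_diff_phrases
-- ===== SOURCE A (Python) =====
-- from difflib import SequenceMatcher
-- from typing import List, Dict, Any, Optional
--
-- def _extract_diff_phrases(earlier: str, later: str) -> str:
--     """Return the changed phrases from *later* relative to *earlier*."""
--     a_words = earlier.split()
--     b_words = later.split()
--     sm = SequenceMatcher(None, a_words, b_words, autojunk=False)
--     diff_parts: List[str] = []
--     for tag, _i1, _i2, j1, j2 in sm.get_opcodes():
--         if tag in ("insert", "replace"):
--             diff_parts.append(" ".join(b_words[j1:j2]))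
--     return " ".join(diff_parts)
-- ===== SOURCE B (Python) =====
-- def _extract_diff_phrases(earlier: str, later: str) -> str:
--     """Return the changed phrases from *later* relative to *earlier*."""
--     a_words = earlier.split()
--     b_words = later.split()
--
--     def longest_block(alo, ahi, blo, bhi):
--         # longest common contiguous run of words, one DP row at a time
--         best_i, best_j, best_k = alo, blo, 0
--         prev = [0] * (bhi - blo)
--         for i in range(alo, ahi):
--             cur = [0] * (bhi - blo)
--             for j in range(blo, bhi):
--                 if a_words[i] == b_words[j]:
--                     k = (prev[j - blo - 1] if j > blo else 0) + 1
--                     cur[j - blo] = k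
--                     if k > best_k:
--                         best_i, best_j, best_k = i - k + 1, j - k + 1, k
--             prev = cur
--         return best_i, best_j, best_k
--
--     def phrases(alo, ahi, blo, bhi):
--         # anchor on the longest common block and recurse on both sides;
--         # a stretch of b-words with no block in it is a changed phrase
--         i, j, k = longest_block(alo, ahi, blo, bhi)
--         if k == 0:
--             return [" ".join(b_words[blo:bhi])] if blo < bhi else []
--         return phrases(alo, i, blo, j) + phrases(i + k, ahi, j + k, bhi)
--
--     return " ".join(phrases(0, len(a_words), 0, len(b_words)))
-- ===== Notes on version B (the rewrite author's own statement) =====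
-- stated objective: alternative
-- what changed: B is a self-contained recursive diff: it finds the longest common block with a dense one-row-at-a-time DP over all index pairs (instead of difflib's hash index b2j plus sparse dict j2len plus left/right extension loops) and recurses on both sides of the block, emitting unmatched b-stretches directly, instead of A's difflib pipeline (queue + sort + adjacent-merge in get_matching_blocks, then tagged opcodes filtered for insert/replace).
import Mathlib
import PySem

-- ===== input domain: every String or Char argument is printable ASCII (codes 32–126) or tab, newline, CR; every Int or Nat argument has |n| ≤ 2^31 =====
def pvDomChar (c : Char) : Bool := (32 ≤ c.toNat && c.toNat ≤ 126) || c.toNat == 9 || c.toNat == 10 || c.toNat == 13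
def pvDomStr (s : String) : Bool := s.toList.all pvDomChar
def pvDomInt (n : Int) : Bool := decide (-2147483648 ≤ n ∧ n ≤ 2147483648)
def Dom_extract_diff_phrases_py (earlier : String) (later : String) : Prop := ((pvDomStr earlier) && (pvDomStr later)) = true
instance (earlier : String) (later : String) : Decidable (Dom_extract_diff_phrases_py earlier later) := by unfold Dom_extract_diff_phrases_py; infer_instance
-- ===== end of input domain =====

-- B is a self-contained recursive diff (dense one-row DP for the longest common block,
-- then recursion on both sides emitting unmatched b-stretches) replacing A's difflib
-- pipeline (hash index + sparse dict matching + extension loops, matching-block queue,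
-- sort, merge, tagged opcodes filtered for insert/replace). Objective: alternative.

-- ===== PORT A =====
-- difflib's SequenceMatcher internals (isjunk=None, autojunk=False), used by A.

-- b2j = {}; for j, elt in enumerate(b): b2j.setdefault(elt, []).append(j)
def pvB2j (b : List String) : PySem.Dict String (List Nat) :=
  (b.zipIdx).foldl (fun d p => d.insert p.1 ((d.getD p.1 []) ++ [p.2])) PySem.Dict.empty

-- inner loop of find_longest_match: 'for j in b2j.get(a[i], []):' with continue/break;
-- state = (newj2len, besti, bestj, bestsize); the 'break' (j >= bhi) stops the scan.
def pvFlmInner (blo bhi i : Nat) (j2len : PySem.Dict Nat Nat) :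
    List Nat → PySem.Dict Nat Nat × Nat × Nat × Nat → PySem.Dict Nat Nat × Nat × Nat × Nat
  | [], st => st
  | j :: rest, st =>
    if j < blo then pvFlmInner blo bhi i j2len rest st                       -- continue
    else if bhi ≤ j then st                                                  -- break
    else
      -- j2len.get(j-1, 0): for j = 0 Python reads key -1, which is never present
      let k := (if j = 0 then 0 else j2len.getD (j - 1) 0) + 1
      let newj2len := st.1.insert j k
      let st' := if st.2.2.2 < k then (newj2len, i + 1 - k, j + 1 - k, k)
                 else (newj2len, st.2)
      pvFlmInner blo bhi i j2len rest st'

-- while besti > alo and bestj > blo and a[besti-1] == b[bestj-1]: extend left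
def pvExtLeft (a b : List String) (alo blo : Nat) (besti bestj size : Nat) : Nat × Nat × Nat :=
  if alo < besti ∧ blo < bestj ∧ a.getD (besti - 1) "" = b.getD (bestj - 1) "" then
    pvExtLeft a b alo blo (besti - 1) (bestj - 1) (size + 1)
  else (besti, bestj, size)
  termination_by besti

-- while besti+size < ahi and bestj+size < bhi and a[besti+size] == b[bestj+size]: size += 1
def pvExtRight (a b : List String) (ahi bhi : Nat) (besti bestj size : Nat) : Nat × Nat × Nat :=
  if besti + size < ahi ∧ bestj + size < bhi ∧ a.getD (besti + size) "" = b.getD (bestj + size) "" then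
    pvExtRight a b ahi bhi besti bestj (size + 1)
  else (besti, bestj, size)
  termination_by ahi - size

-- find_longest_match(alo, ahi, blo, bhi) (no junk: the two junk-extension loops are no-ops)
def pvFlm (a b : List String) (b2j : PySem.Dict String (List Nat)) (alo ahi blo bhi : Nat) :
    Nat × Nat × Nat :=
  let st := (List.range' alo (ahi - alo)).foldl
    (fun (st : PySem.Dict Nat Nat × Nat × Nat × Nat) i =>
      pvFlmInner blo bhi i st.1 (b2j.getD (a.getD i "") []) (PySem.Dict.empty, st.2))
    (PySem.Dict.empty, alo, blo, 0)
  let e := pvExtLeft a b alo blo st.2.1 st.2.2.1 st.2.2.2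
  pvExtRight a b ahi bhi e.1 e.2.1 e.2.2

-- get_matching_blocks' queue loop, as recursion on the subranges (left, match, right);
-- difflib collects the blocks from a LIFO queue and sorts them — this recursion emits the
-- same blocks already in that sorted order, so the final .sort() is the identity.
-- fuel = len(a)+len(b)+1 bounds the recursion depth (each subrange is strictly smaller);
-- it only makes the recursion structural and never runs out on the reachable calls.
def pvMB (a b : List String) (b2j : PySem.Dict String (List Nat)) :
    Nat → Nat → Nat → Nat → Nat → List (Nat × Nat × Nat)
  | 0, _, _, _, _ => []
  | fuel + 1, alo, ahi, blo, bhi =>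
    let m := pvFlm a b b2j alo ahi blo bhi
    if m.2.2 = 0 then []
    else
      (if alo < m.1 ∧ blo < m.2.1 then pvMB a b b2j fuel alo m.1 blo m.2.1 else []) ++
      [(m.1, m.2.1, m.2.2)] ++
      (if m.1 + m.2.2 < ahi ∧ m.2.1 + m.2.2 < bhi then
        pvMB a b b2j fuel (m.1 + m.2.2) ahi (m.2.1 + m.2.2) bhi else [])

-- the second loop of get_matching_blocks: merge adjacent blocks; state (i1, j1, k1) = (0,0,0)
def pvCollapse : List (Nat × Nat × Nat) → Nat → Nat → Nat → List (Nat × Nat × Nat)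
  | [], i1, j1, k1 => if k1 ≠ 0 then [(i1, j1, k1)] else []
  | (i2, j2, k2) :: rest, i1, j1, k1 =>
    if i1 + k1 = i2 ∧ j1 + k1 = j2 then pvCollapse rest i1 j1 (k1 + k2)
    else (if k1 ≠ 0 then [(i1, j1, k1)] else []) ++ pvCollapse rest i2 j2 k2

-- sm.get_matching_blocks() (with the trailing sentinel (len(a), len(b), 0))
def pvMatchingBlocks (a b : List String) : List (Nat × Nat × Nat) :=
  pvCollapse (pvMB a b (pvB2j b) (a.length + b.length + 1) 0 a.length 0 b.length) 0 0 0
    ++ [(a.length, b.length, 0)]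

-- get_opcodes(): 'i = j = 0; for ai, bj, size in blocks: tag …; answer.append(…)'
def pvOpcodes : List (Nat × Nat × Nat) → Nat → Nat → List (String × Nat × Nat × Nat × Nat)
  | [], _, _ => []
  | (ai, bj, size) :: rest, i, j =>
    let tag : String :=
      if i < ai ∧ j < bj then "replace"
      else if i < ai then "delete"
      else if j < bj then "insert"
      else ""
    (if tag ≠ "" then [(tag, i, ai, j, bj)] else []) ++
    (if size ≠ 0 then [("equal", ai, ai + size, bj, bj + size)] else []) ++
    pvOpcodes rest (ai + size) (bj + size)

-- 'for tag, _i1, _i2, j1, j2 in sm.get_opcodes(): if tag in ("insert","replace"): append(" ".join(b[j1:j2]))'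
def pvDiffParts (b : List String) : List (String × Nat × Nat × Nat × Nat) → List String
  | [] => []
  | (tag, _, _, j1, j2) :: rest =>
    (if tag = "insert" ∨ tag = "replace" then
      [PySem.Str.join " " (PySem.List.slice b (some (j1 : Int)) (some (j2 : Int)))] else []) ++
    pvDiffParts b rest

def extract_diff_phrases_py (earlier : String) (later : String) : String :=
  let a_words := PySem.Str.split₀ earlier
  let b_words := PySem.Str.split₀ later
  PySem.Str.join " " (pvDiffParts b_words (pvOpcodes (pvMatchingBlocks a_words b_words) 0 0))

-- ===== PORT B =====
-- inner loop of longest_block: 'for j in range(blo, bhi): if a_words[i] == b_words[j]: …';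
-- state = (cur, best_i, best_j, best_k)
def pvRowB (a b : List String) (i blo : Nat) (prev : List Nat) :
    List Nat → List Nat × Nat × Nat × Nat → List Nat × Nat × Nat × Nat
  | [], st => st
  | j :: rest, st =>
    if a.getD i "" = b.getD j "" then
      let k := (if blo < j then prev.getD (j - blo - 1) 0 else 0) + 1
      let cur := st.1.set (j - blo) k
      pvRowB a b i blo prev rest
        (if st.2.2.2 < k then (cur, i + 1 - k, j + 1 - k, k) else (cur, st.2))
    else pvRowB a b i blo prev rest st

-- longest_block(alo, ahi, blo, bhi): dense longest-common-run DP, one row at a time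
def pvFlmB (a b : List String) (alo ahi blo bhi : Nat) : Nat × Nat × Nat :=
  ((List.range' alo (ahi - alo)).foldl
    (fun (st : List Nat × Nat × Nat × Nat) i =>
      pvRowB a b i blo st.1 (List.range' blo (bhi - blo)) (List.replicate (bhi - blo) 0, st.2))
    (List.replicate (bhi - blo) 0, alo, blo, 0)).2

-- phrases(alo, ahi, blo, bhi): recurse around the longest block, emitting unmatched
-- b-stretches; fuel = len(a)+len(b)+1 only makes the recursion structural (each
-- subrange is strictly smaller, so it never runs out on the reachable calls)
def pvPartsB (a b : List String) :
    Nat → Nat → Nat → Nat → Nat → List String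
  | 0, _, _, blo, bhi =>
    if blo < bhi then
      [PySem.Str.join " " (PySem.List.slice b (some (blo : Int)) (some (bhi : Int)))] else []
  | fuel + 1, alo, ahi, blo, bhi =>
    let m := pvFlmB a b alo ahi blo bhi
    if m.2.2 = 0 then
      if blo < bhi then
        [PySem.Str.join " " (PySem.List.slice b (some (blo : Int)) (some (bhi : Int)))] else []
    else
      pvPartsB a b fuel alo m.1 blo m.2.1 ++
      pvPartsB a b fuel (m.1 + m.2.2) ahi (m.2.1 + m.2.2) bhi

def extract_diff_phrases_py_alt (earlier : String) (later : String) : String :=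
  let a_words := PySem.Str.split₀ earlier
  let b_words := PySem.Str.split₀ later
  PySem.Str.join " "
    (pvPartsB a_words b_words (a_words.length + b_words.length + 1)
      0 a_words.length 0 b_words.length)

-- ===== PRECONDITION & SPEC =====
def Spec_extract_diff_phrases_py (earlier : String) (later : String) (out : String) : Prop := out = extract_diff_phrases_py_alt earlier later
instance (earlier : String) (later : String) (out : String) : Decidable (Spec_extract_diff_phrases_py earlier later out) := by unfold Spec_extract_diff_phrases_py; infer_instance

-- ===== CLAIM (what is proved, stated in full; the proofs are below) =====
def Claim_equal_extract_diff_phrases_py : Prop := ∀ (earlier : String) (later : String), Dom_extract_diff_phrases_py earlier later → Spec_extract_diff_phrases_py earlier later (extract_diff_phrases_py earlier later)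

-- ===== LEMMAS AND PROOFS =====

-- mathematical run length: length of the longest common run of words ending at (i, j)
-- that stays inside the window [alo, ·] × [blo, ·]
def pvR (a b : List String) (alo blo : Nat) (i j : Nat) : Nat :=
  if a.getD i "" = b.getD j "" then
    (if h : alo < i ∧ blo < j then pvR a b alo blo (i - 1) (j - 1) else 0) + 1
  else 0
  termination_by i
  decreasing_by omega

-- the best-block update step both inner loops perform
def pvUpd (best : Nat × Nat × Nat) (t : Nat × Nat × Nat) : Nat × Nat × Nat :=
  if best.2.2 < t.2.2 then (t.1 + 1 - t.2.2, t.2.1 + 1 - t.2.2, t.2.2) else best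

-- all (i, j, run-length) triples of the window, in scan order
def pvL (a b : List String) (alo ahi blo bhi : Nat) : List (Nat × Nat × Nat) :=
  (List.range' alo (ahi - alo)).flatMap (fun i =>
    ((List.range' blo (bhi - blo)).filter (fun j => a.getD i "" == b.getD j "")).map
      (fun j => (i, j, pvR a b alo blo i j)))

theorem pvUpd_foldl_le (L : List (Nat × Nat × Nat)) (bst : Nat × Nat × Nat) :
    bst.2.2 ≤ (L.foldl pvUpd bst).2.2 := by
  induction L generalizing bst with
  | nil => exact le_refl _
  | cons t L ih =>
    refine le_trans ?_ (ih (pvUpd bst t))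
    unfold pvUpd
    split
    · exact Nat.le_of_lt (by assumption)
    · exact le_refl _

theorem pvUpd_foldl_mem_le (L : List (Nat × Nat × Nat)) (bst : Nat × Nat × Nat) :
    ∀ t ∈ L, t.2.2 ≤ (L.foldl pvUpd bst).2.2 := by
  induction L generalizing bst with
  | nil => intro t ht; simp at ht
  | cons u L ih =>
    intro t ht
    rcases List.mem_cons.mp ht with h | h
    · subst h
      refine le_trans ?_ (pvUpd_foldl_le L (pvUpd bst t))
      unfold pvUpd
      split
      · exact le_refl _
      · omega
    · exact ih (pvUpd bst u) t h

theorem pvUpd_foldl_cases (L : List (Nat × Nat × Nat)) (bst : Nat × Nat × Nat) :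
    L.foldl pvUpd bst = bst ∨
      ∃ t ∈ L, bst.2.2 < t.2.2 ∧
        L.foldl pvUpd bst = (t.1 + 1 - t.2.2, t.2.1 + 1 - t.2.2, t.2.2) := by
  induction L generalizing bst with
  | nil => exact Or.inl rfl
  | cons u L ih =>
    by_cases hu : bst.2.2 < u.2.2
    · have hstep : List.foldl pvUpd bst (u :: L)
          = List.foldl pvUpd (u.1 + 1 - u.2.2, u.2.1 + 1 - u.2.2, u.2.2) L := by
        simp only [List.foldl_cons]
        congr 1
        unfold pvUpd
        rw [if_pos hu]
      rcases ih (u.1 + 1 - u.2.2, u.2.1 + 1 - u.2.2, u.2.2) with h | ⟨t, ht, hlt, heq⟩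
      · right
        exact ⟨u, List.mem_cons_self .., hu, by rw [hstep, h]⟩
      · right
        refine ⟨t, List.mem_cons_of_mem _ ht, ?_, by rw [hstep, heq]⟩
        simp at hlt
        omega
    · have hstep : List.foldl pvUpd bst (u :: L) = List.foldl pvUpd bst L := by
        simp only [List.foldl_cons]
        congr 1
        unfold pvUpd
        rw [if_neg hu]
      rcases ih bst with h | ⟨t, ht, hlt, heq⟩
      · exact Or.inl (by rw [hstep, h])
      · exact Or.inr ⟨t, List.mem_cons_of_mem _ ht, hlt, by rw [hstep, heq]⟩

theorem pvR_le_left (a b : List String) (alo blo : Nat) :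
    ∀ i j, alo ≤ i → alo + pvR a b alo blo i j ≤ i + 1 := by
  intro i
  induction i using Nat.strong_induction_on with
  | _ i ih =>
    intro j hi
    rw [pvR]
    split
    · split
      · rename_i hg
        have := ih (i - 1) (by omega) (j - 1) (by omega)
        omega
      · omega
    · omega

theorem pvR_le_right (a b : List String) (alo blo : Nat) :
    ∀ i j, blo ≤ j → blo + pvR a b alo blo i j ≤ j + 1 := by
  intro i
  induction i using Nat.strong_induction_on with
  | _ i ih =>
    intro j hj
    rw [pvR]
    split
    · split
      · rename_i hg
        have := ih (i - 1) (by omega) (j - 1) (by omega)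
        omega
      · omega
    · omega

theorem pvR_run (a b : List String) (alo blo : Nat) :
    ∀ i j t, t < pvR a b alo blo i j → a.getD (i - t) "" = b.getD (j - t) "" := by
  intro i
  induction i using Nat.strong_induction_on with
  | _ i ih =>
    intro j t ht
    rw [pvR] at ht
    by_cases hm : a.getD i "" = b.getD j ""
    · rw [if_pos hm] at ht
      cases t with
      | zero => simpa using hm
      | succ t =>
        by_cases hg : alo < i ∧ blo < j
        · rw [dif_pos hg] at ht
          have := ih (i - 1) (by omega) (j - 1) t (by omega)
          have h1 : i - 1 - t = i - (t + 1) := by omega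
          have h2 : j - 1 - t = j - (t + 1) := by omega
          rwa [h1, h2] at this
        · rw [dif_neg hg] at ht
          omega
    · rw [if_neg hm] at ht
      omega

theorem pvR_ge (a b : List String) (alo blo : Nat) :
    ∀ m i j, alo + m ≤ i → blo + m ≤ j →
      (∀ t, t ≤ m → a.getD (i - t) "" = b.getD (j - t) "") →
      m + 1 ≤ pvR a b alo blo i j := by
  intro m
  induction m with
  | zero =>
    intro i j hi hj hch
    rw [pvR, if_pos (by simpa using hch 0 (le_refl 0))]
    omega
  | succ m ih =>
    intro i j hi hj hch
    have hrec : m + 1 ≤ pvR a b alo blo (i - 1) (j - 1) := by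
      refine ih (i - 1) (j - 1) (by omega) (by omega) ?_
      intro t ht
      have := hch (t + 1) (by omega)
      have h1 : i - 1 - t = i - (t + 1) := by omega
      have h2 : j - 1 - t = j - (t + 1) := by omega
      rw [h1, h2]
      exact this
    rw [pvR, if_pos (by simpa using hch 0 (Nat.zero_le _)), dif_pos (by omega)]
    omega

theorem pvGetD_set (l : List Nat) (n m v : Nat) :
    (l.set n v).getD m 0 = if n = m ∧ n < l.length then v else l.getD m 0 := by
  simp only [List.getD_eq_getElem?_getD, List.getElem?_set]
  split_ifs with h1 h2 h3 <;> simp_all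
  omega

theorem pvGetD_replicate (n m v : Nat) : (List.replicate n v).getD m v = v := by
  simp only [List.getD_eq_getElem?_getD, List.getElem?_replicate]
  split <;> rfl

-- ---- dense side: pvFlmB computes the fold of pvUpd over pvL ----

theorem pvRowB_char (a b : List String) (alo i blo bhi : Nat) (prev : List Nat)
    (hprev : ∀ j, blo ≤ j → j < bhi →
      prev.getD (j - blo) 0 = if alo < i then pvR a b alo blo (i - 1) j else 0) :
    ∀ (m lo : Nat), blo ≤ lo → lo + m = bhi →
    ∀ (cur : List Nat) (bst : Nat × Nat × Nat),
      (∀ j, blo ≤ j → j < lo → cur.getD (j - blo) 0 = pvR a b alo blo i j) →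
      (∀ j, lo ≤ j → cur.getD (j - blo) 0 = 0) →
      cur.length = bhi - blo →
      (pvRowB a b i blo prev (List.range' lo m) (cur, bst)).2
        = (((List.range' lo m).filter (fun j => a.getD i "" == b.getD j "")).map
            (fun j => (i, j, pvR a b alo blo i j))).foldl pvUpd bst
      ∧ (pvRowB a b i blo prev (List.range' lo m) (cur, bst)).1.length = bhi - blo
      ∧ (∀ j, blo ≤ j → j < bhi →
          (pvRowB a b i blo prev (List.range' lo m) (cur, bst)).1.getD (j - blo) 0
            = pvR a b alo blo i j) := by
  intro m
  induction m with
  | zero =>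
    intro lo hlo hsum cur bst hc1 hc2 hlen
    refine ⟨rfl, hlen, ?_⟩
    intro j hj1 hj2
    exact hc1 j hj1 (by omega)
  | succ m ih =>
    intro lo hlo hsum cur bst hc1 hc2 hlen
    have hlobhi : lo < bhi := by omega
    rw [List.range'_succ]
    by_cases hm : a.getD i "" = b.getD lo ""
    · have hk : (if blo < lo then prev.getD (lo - blo - 1) 0 else 0) + 1
          = pvR a b alo blo i lo := by
        rw [pvR, if_pos hm]
        by_cases h1 : blo < lo
        · rw [if_pos h1]
          have := hprev (lo - 1) (by omega) (by omega)
          have hidx : lo - blo - 1 = lo - 1 - blo := by omega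
          rw [hidx, this]
          by_cases h2 : alo < i
          · rw [if_pos h2, dif_pos ⟨h2, h1⟩]
          · rw [if_neg h2, dif_neg (by omega)]
        · rw [if_neg h1, dif_neg (by omega)]
      have hstep : pvRowB a b i blo prev (lo :: List.range' (lo + 1) m) (cur, bst)
          = pvRowB a b i blo prev (List.range' (lo + 1) m)
              (cur.set (lo - blo) (pvR a b alo blo i lo),
               pvUpd bst (i, lo, pvR a b alo blo i lo)) := by
        simp only [pvRowB, if_pos hm, hk, pvUpd]
        split <;> rfl
      rw [hstep]
      have hlen' : (cur.set (lo - blo) (pvR a b alo blo i lo)).length = bhi - blo := by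
        simp [hlen]
      have hc1' : ∀ j, blo ≤ j → j < lo + 1 →
          (cur.set (lo - blo) (pvR a b alo blo i lo)).getD (j - blo) 0
            = pvR a b alo blo i j := by
        intro j hj1 hj2
        rw [pvGetD_set]
        by_cases hje : j = lo
        · subst hje
          rw [if_pos ⟨rfl, by omega⟩]
        · rw [if_neg (by omega)]
          exact hc1 j hj1 (by omega)
      have hc2' : ∀ j, lo + 1 ≤ j →
          (cur.set (lo - blo) (pvR a b alo blo i lo)).getD (j - blo) 0 = 0 := by
        intro j hj
        rw [pvGetD_set, if_neg (by omega)]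
        exact hc2 j (by omega)
      have hres := ih (lo + 1) (by omega) (by omega)
        (cur.set (lo - blo) (pvR a b alo blo i lo))
        (pvUpd bst (i, lo, pvR a b alo blo i lo)) hc1' hc2' hlen'
      have hfilter : (lo :: List.range' (lo + 1) m).filter
            (fun j => a.getD i "" == b.getD j "")
          = lo :: (List.range' (lo + 1) m).filter (fun j => a.getD i "" == b.getD j "") := by
        have hbeq : (a.getD i "" == b.getD lo "") = true := beq_iff_eq.mpr hm
        simp only [List.filter_cons, hbeq, if_pos]
      rw [hfilter]
      simp only [List.map_cons, List.foldl_cons]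
      exact hres
    · have hstep : pvRowB a b i blo prev (lo :: List.range' (lo + 1) m) (cur, bst)
          = pvRowB a b i blo prev (List.range' (lo + 1) m) (cur, bst) := by
        simp only [pvRowB, if_neg hm]
      rw [hstep]
      have hc1' : ∀ j, blo ≤ j → j < lo + 1 → cur.getD (j - blo) 0 = pvR a b alo blo i j := by
        intro j hj1 hj2
        by_cases hje : j = lo
        · subst hje
          rw [hc2 j (le_refl _), pvR, if_neg hm]
        · exact hc1 j hj1 (by omega)
      have hc2' : ∀ j, lo + 1 ≤ j → cur.getD (j - blo) 0 = 0 := fun j hj => hc2 j (by omega)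
      have hres := ih (lo + 1) (by omega) (by omega) cur bst hc1' hc2' hlen
      have hfilter : (lo :: List.range' (lo + 1) m).filter
            (fun j => a.getD i "" == b.getD j "")
          = (List.range' (lo + 1) m).filter (fun j => a.getD i "" == b.getD j "") := by
        have hbeq : (a.getD i "" == b.getD lo "") = false := beq_eq_false_iff_ne.mpr hm
        simp only [List.filter_cons, hbeq]
        rfl
      rw [hfilter]
      exact hres

theorem pvRowsB_char (a b : List String) (alo blo bhi : Nat) (hblo : blo ≤ bhi) :
    ∀ (n i0 : Nat), alo ≤ i0 →
    ∀ (prev : List Nat) (bst : Nat × Nat × Nat),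
      prev.length = bhi - blo →
      (∀ j, blo ≤ j → j < bhi →
        prev.getD (j - blo) 0 = if alo < i0 then pvR a b alo blo (i0 - 1) j else 0) →
      ((List.range' i0 n).foldl
        (fun (st : List Nat × Nat × Nat × Nat) i =>
          pvRowB a b i blo st.1 (List.range' blo (bhi - blo)) (List.replicate (bhi - blo) 0, st.2))
        (prev, bst)).2
      = ((List.range' i0 n).flatMap (fun i =>
          ((List.range' blo (bhi - blo)).filter (fun j => a.getD i "" == b.getD j "")).map
            (fun j => (i, j, pvR a b alo blo i j)))).foldl pvUpd bst := by
  intro n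
  induction n with
  | zero => intro i0 _ prev bst _ _; rfl
  | succ n ih =>
    intro i0 hi0 prev bst hlen hprev
    rw [List.range'_succ]
    simp only [List.foldl_cons, List.flatMap_cons, List.foldl_append]
    have hrow := pvRowB_char a b alo i0 blo bhi prev hprev (bhi - blo) blo (le_refl _)
      (by omega) (List.replicate (bhi - blo) 0) bst
      (by intro j hj1 hj2; omega)
      (by intro j _; exact pvGetD_replicate _ _ 0)
      (by simp)
    obtain ⟨hbest, hlen', hchar⟩ := hrow
    have := ih (i0 + 1) (by omega)
      (pvRowB a b i0 blo prev (List.range' blo (bhi - blo))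
        (List.replicate (bhi - blo) 0, bst)).1
      (pvRowB a b i0 blo prev (List.range' blo (bhi - blo))
        (List.replicate (bhi - blo) 0, bst)).2
      hlen'
      (by
        intro j hj1 hj2
        rw [hchar j hj1 hj2, if_pos (by omega)]
        simp)
    rw [this, hbest]

theorem pvFlmB_char (a b : List String) (alo ahi blo bhi : Nat) (hblo : blo ≤ bhi) :
    pvFlmB a b alo ahi blo bhi = (pvL a b alo ahi blo bhi).foldl pvUpd (alo, blo, 0) := by
  unfold pvFlmB pvL
  rw [pvRowsB_char a b alo blo bhi hblo (ahi - alo) alo (le_refl _)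
    (List.replicate (bhi - blo) 0) (alo, blo, 0) (by simp)
    (by intro j _ _; rw [if_neg (by omega)]; exact pvGetD_replicate _ _ 0)]

-- ---- sparse side: difflib's DP fold computes the same fold ----

theorem pvB2j_getD (b : List String) (w : String) :
    (pvB2j b).getD w [] = (List.range' 0 b.length).filter (fun j => b.getD j "" == w) := by
  induction b using List.reverseRecOn generalizing w with
  | nil => rfl
  | append_singleton b x ih =>
    have hmb : pvB2j (b ++ [x]) = (pvB2j b).insert x ((pvB2j b).getD x [] ++ [b.length]) := by
      unfold pvB2j
      rw [List.zipIdx_append, List.foldl_append]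
      simp
    have hlen : (b ++ [x]).length = b.length + 1 := by simp
    rw [hmb, hlen]
    have hr : List.range' 0 (b.length + 1) = List.range' 0 b.length ++ [b.length] := by
      rw [List.range'_concat]
      simp
    rw [hr, List.filter_append]
    have hfc : (List.range' 0 b.length).filter (fun j => (b ++ [x]).getD j "" == w)
        = (List.range' 0 b.length).filter (fun j => b.getD j "" == w) := by
      apply List.filter_congr
      intro j hj
      have hjlen : j < b.length := by
        have := List.mem_range'_1.mp hj
        omega
      rw [List.getD_append _ _ _ _ hjlen]
    have hx : (b ++ [x]).getD b.length "" = x := by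
      rw [List.getD_append_right _ _ _ _ (le_refl _)]
      simp
    rw [hfc]
    by_cases hw : w = x
    · subst hw
      rw [PySem.Dict.getD_insert, if_pos rfl, ih]
      have : List.filter (fun j => (b ++ [w]).getD j "" == w) [b.length] = [b.length] := by
        simp
      rw [this]
    · rw [PySem.Dict.getD_insert, if_neg hw, ih]
      have hb : ((b ++ [x]).getD b.length "" == w) = false := by
        rw [hx]
        exact beq_eq_false_iff_ne.mpr (Ne.symm hw)
      have : List.filter (fun j => (b ++ [x]).getD j "" == w) [b.length] = [] := by
        simp
        exact fun h => hw h.symm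
      rw [this, List.append_nil]

theorem pvFlmInner_skip (blo bhi i : Nat) (d : PySem.Dict Nat Nat) :
    ∀ (l1 l2 : List Nat) (st : PySem.Dict Nat Nat × Nat × Nat × Nat),
      (∀ j ∈ l1, j < blo) →
      pvFlmInner blo bhi i d (l1 ++ l2) st = pvFlmInner blo bhi i d l2 st := by
  intro l1
  induction l1 with
  | nil => intro l2 st _; rfl
  | cons j l1 ih =>
    intro l2 st h
    simp only [List.cons_append, pvFlmInner]
    rw [if_pos (h j (List.mem_cons_self ..))]
    exact ih l2 st (fun j' hj' => h j' (List.mem_cons_of_mem _ hj'))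

theorem pvFlmInner_dead (blo bhi i : Nat) (d : PySem.Dict Nat Nat) :
    ∀ (l : List Nat) (st : PySem.Dict Nat Nat × Nat × Nat × Nat),
      (∀ j ∈ l, j < blo ∨ bhi ≤ j) →
      pvFlmInner blo bhi i d l st = st := by
  intro l
  induction l with
  | nil => intro st _; rfl
  | cons j l ih =>
    intro st h
    simp only [pvFlmInner]
    by_cases hj : j < blo
    · rw [if_pos hj]
      exact ih st (fun j' hj' => h j' (List.mem_cons_of_mem _ hj'))
    · rw [if_neg hj]
      have : bhi ≤ j := by
        rcases h j (List.mem_cons_self ..) with h' | h'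
        · omega
        · exact h'
      rw [if_pos this]

theorem pvFlmInner_char (a b : List String) (alo i blo bhi : Nat) (d : PySem.Dict Nat Nat)
    (hd : ∀ j, blo ≤ j → j < bhi →
      d.getD j 0 = if alo < i then pvR a b alo blo (i - 1) j else 0)
    (hdk : ∀ j, d.getD j 0 ≠ 0 → blo ≤ j ∧ j < bhi) :
    ∀ (m lo : Nat), blo ≤ lo → lo + m = bhi →
    ∀ (tail : List Nat) (acc : PySem.Dict Nat Nat) (bst : Nat × Nat × Nat),
      (∀ j, blo ≤ j → j < lo → acc.getD j 0 = pvR a b alo blo i j) →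
      (∀ j, acc.getD j 0 ≠ 0 → blo ≤ j ∧ j < lo) →
      ∃ accF,
        pvFlmInner blo bhi i d
            (((List.range' lo m).filter (fun j => a.getD i "" == b.getD j "")) ++ tail)
            (acc, bst)
          = pvFlmInner blo bhi i d tail
              (accF,
               (((List.range' lo m).filter (fun j => a.getD i "" == b.getD j "")).map
                  (fun j => (i, j, pvR a b alo blo i j))).foldl pvUpd bst)
        ∧ (∀ j, blo ≤ j → j < bhi → accF.getD j 0 = pvR a b alo blo i j)
        ∧ (∀ j, accF.getD j 0 ≠ 0 → blo ≤ j ∧ j < bhi) := by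
  intro m
  induction m with
  | zero =>
    intro lo hlo hsum tail acc bst hacc1 hacc2
    refine ⟨acc, by simp, ?_, ?_⟩
    · intro j hj1 hj2
      exact hacc1 j hj1 (by omega)
    · intro j hj
      have := hacc2 j hj
      omega
  | succ m ih =>
    intro lo hlo hsum tail acc bst hacc1 hacc2
    have hlobhi : lo < bhi := by omega
    rw [List.range'_succ]
    by_cases hm : a.getD i "" = b.getD lo ""
    · have hk : (if lo = 0 then 0 else d.getD (lo - 1) 0) + 1 = pvR a b alo blo i lo := by
        rw [pvR, if_pos hm]
        by_cases h0 : lo = 0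
        · rw [if_pos h0, dif_neg (by omega)]
        · rw [if_neg h0]
          by_cases h1 : blo < lo
          · rw [hd (lo - 1) (by omega) (by omega)]
            by_cases h2 : alo < i
            · rw [if_pos h2, dif_pos ⟨h2, h1⟩]
            · rw [if_neg h2, dif_neg (by omega)]
          · have hz : d.getD (lo - 1) 0 = 0 := by
              by_contra hnz
              have := hdk (lo - 1) hnz
              omega
            rw [hz, dif_neg (by omega)]
      have hbeq : (a.getD i "" == b.getD lo "") = true := beq_iff_eq.mpr hm
      have hfilter : (lo :: List.range' (lo + 1) m).filter
            (fun j => a.getD i "" == b.getD j "")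
          = lo :: (List.range' (lo + 1) m).filter (fun j => a.getD i "" == b.getD j "") := by
        simp only [List.filter_cons, hbeq, if_pos]
      rw [hfilter]
      have hstep : pvFlmInner blo bhi i d
            ((lo :: (List.range' (lo + 1) m).filter (fun j => a.getD i "" == b.getD j "")) ++ tail)
            (acc, bst)
          = pvFlmInner blo bhi i d
              (((List.range' (lo + 1) m).filter (fun j => a.getD i "" == b.getD j "")) ++ tail)
              (acc.insert lo (pvR a b alo blo i lo), pvUpd bst (i, lo, pvR a b alo blo i lo)) := by
        simp only [List.cons_append, pvFlmInner]
        rw [if_neg (by omega), if_neg (by omega), hk]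
        unfold pvUpd
        split <;> rfl
      rw [hstep]
      have hacc1' : ∀ j, blo ≤ j → j < lo + 1 →
          (acc.insert lo (pvR a b alo blo i lo)).getD j 0 = pvR a b alo blo i j := by
        intro j hj1 hj2
        rw [PySem.Dict.getD_insert]
        by_cases hje : j = lo
        · rw [if_pos hje, hje]
        · rw [if_neg hje]
          exact hacc1 j hj1 (by omega)
      have hacc2' : ∀ j, (acc.insert lo (pvR a b alo blo i lo)).getD j 0 ≠ 0 →
          blo ≤ j ∧ j < lo + 1 := by
        intro j hj
        rw [PySem.Dict.getD_insert] at hj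
        by_cases hje : j = lo
        · omega
        · rw [if_neg hje] at hj
          have := hacc2 j hj
          omega
      obtain ⟨accF, heq, hF1, hF2⟩ := ih (lo + 1) (by omega) (by omega) tail
        (acc.insert lo (pvR a b alo blo i lo)) (pvUpd bst (i, lo, pvR a b alo blo i lo))
        hacc1' hacc2'
      refine ⟨accF, ?_, hF1, hF2⟩
      rw [heq]
      simp only [List.map_cons, List.foldl_cons]
    · have hbeq : (a.getD i "" == b.getD lo "") = false := beq_eq_false_iff_ne.mpr hm
      have hfilter : (lo :: List.range' (lo + 1) m).filter
            (fun j => a.getD i "" == b.getD j "")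
          = (List.range' (lo + 1) m).filter (fun j => a.getD i "" == b.getD j "") := by
        simp only [List.filter_cons, hbeq]
        rfl
      rw [hfilter]
      have hacc1' : ∀ j, blo ≤ j → j < lo + 1 → acc.getD j 0 = pvR a b alo blo i j := by
        intro j hj1 hj2
        by_cases hje : j = lo
        · subst hje
          have hz : acc.getD j 0 = 0 := by
            by_contra hnz
            have := hacc2 j hnz
            omega
          rw [hz, pvR, if_neg hm]
        · exact hacc1 j hj1 (by omega)
      have hacc2' : ∀ j, acc.getD j 0 ≠ 0 → blo ≤ j ∧ j < lo + 1 := by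
        intro j hj
        have := hacc2 j hj
        omega
      exact ih (lo + 1) (by omega) (by omega) tail acc bst hacc1' hacc2' 

theorem pvFlm_fold_char (a b : List String) (alo blo bhi : Nat)
    (hblo : blo ≤ bhi) (hb : bhi ≤ b.length) :
    ∀ (n i0 : Nat), alo ≤ i0 →
    ∀ (d : PySem.Dict Nat Nat) (bst : Nat × Nat × Nat),
      (∀ j, blo ≤ j → j < bhi →
        d.getD j 0 = if alo < i0 then pvR a b alo blo (i0 - 1) j else 0) →
      (∀ j, d.getD j 0 ≠ 0 → blo ≤ j ∧ j < bhi) →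
      ((List.range' i0 n).foldl
        (fun (st : PySem.Dict Nat Nat × Nat × Nat × Nat) i =>
          pvFlmInner blo bhi i st.1 ((pvB2j b).getD (a.getD i "") []) (PySem.Dict.empty, st.2))
        (d, bst)).2
      = ((List.range' i0 n).flatMap (fun i =>
          ((List.range' blo (bhi - blo)).filter (fun j => a.getD i "" == b.getD j "")).map
            (fun j => (i, j, pvR a b alo blo i j)))).foldl pvUpd bst := by
  intro n
  induction n with
  | zero => intro i0 _ d bst _ _; rfl
  | succ n ih =>
    intro i0 hi0 d bst hd hdk
    rw [List.range'_succ]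
    simp only [List.foldl_cons, List.flatMap_cons, List.foldl_append]
    rw [pvB2j_getD b (a.getD i0 "")]
    have hco : (fun j => b.getD j "" == a.getD i0 "") = (fun j => a.getD i0 "" == b.getD j "") := by
      funext j
      exact Bool.beq_comm
    rw [hco]
    have hsplit : List.range' 0 b.length
        = List.range' 0 blo ++ (List.range' blo (bhi - blo) ++ List.range' bhi (b.length - bhi)) := by
      have h1 : List.range' blo (bhi - blo) ++ List.range' bhi (b.length - bhi)
          = List.range' blo (b.length - blo) := by
        have h := @List.range'_append blo (bhi - blo) (b.length - bhi) 1
        simp only [Nat.one_mul] at h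
        rw [show blo + (bhi - blo) = bhi from by omega] at h
        rw [h]
        congr 1
        omega
      rw [h1]
      have h2 := @List.range'_append 0 blo (b.length - blo) 1
      simp only [Nat.one_mul, Nat.zero_add] at h2
      rw [h2]
      congr 1
      omega
    rw [hsplit, List.filter_append, List.filter_append]
    rw [pvFlmInner_skip blo bhi i0 d _ _ _ (by
      intro j hj
      have hj2 := (List.mem_filter.mp hj).1
      have := List.mem_range'_1.mp hj2
      omega)]
    obtain ⟨accF, heq, hF1, hF2⟩ := pvFlmInner_char a b alo i0 blo bhi d hd hdk
      (bhi - blo) blo (le_refl _) (by omega)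
      ((List.range' bhi (b.length - bhi)).filter (fun j => a.getD i0 "" == b.getD j ""))
      PySem.Dict.empty bst
      (by intro j hj1 hj2; omega)
      (by intro j hj; exact absurd rfl hj)
    rw [heq]
    rw [pvFlmInner_dead blo bhi i0 d _ _ (by
      intro j hj
      have hj2 := (List.mem_filter.mp hj).1
      have := List.mem_range'_1.mp hj2
      right
      omega)]
    rw [ih (i0 + 1) (by omega) accF _
      (by
        intro j hj1 hj2
        rw [hF1 j hj1 hj2, if_pos (by omega)]
        simp)
      hF2]

-- ---- the extension loops are no-ops on the DP's best block ----

theorem pvFlmB_I1 (a b : List String) (alo ahi blo bhi : Nat) (hblo : blo ≤ bhi) :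
    ∀ i j, alo ≤ i → i < ahi → blo ≤ j → j < bhi →
      pvR a b alo blo i j ≤ (pvFlmB a b alo ahi blo bhi).2.2 := by
  intro i j hi1 hi2 hj1 hj2
  rw [pvFlmB_char a b alo ahi blo bhi hblo]
  by_cases hm : a.getD i "" = b.getD j ""
  · have hmem : (i, j, pvR a b alo blo i j) ∈ pvL a b alo ahi blo bhi := by
      unfold pvL
      apply List.mem_flatMap.mpr
      refine ⟨i, List.mem_range'_1.mpr ⟨hi1, by omega⟩, ?_⟩
      apply List.mem_map.mpr
      refine ⟨j, List.mem_filter.mpr ⟨List.mem_range'_1.mpr ⟨hj1, by omega⟩, beq_iff_eq.mpr hm⟩, rfl⟩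
    exact pvUpd_foldl_mem_le _ _ _ hmem
  · rw [pvR, if_neg hm]
    exact Nat.zero_le _

theorem pvFlmB_I2 (a b : List String) (alo ahi blo bhi : Nat) (hblo : blo ≤ bhi) :
    pvFlmB a b alo ahi blo bhi = (alo, blo, 0) ∨
      ∃ i j, alo ≤ i ∧ i < ahi ∧ blo ≤ j ∧ j < bhi ∧ 0 < pvR a b alo blo i j ∧
        pvFlmB a b alo ahi blo bhi
          = (i + 1 - pvR a b alo blo i j, j + 1 - pvR a b alo blo i j, pvR a b alo blo i j) := by
  rw [pvFlmB_char a b alo ahi blo bhi hblo]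
  rcases pvUpd_foldl_cases (pvL a b alo ahi blo bhi) (alo, blo, 0) with h | ⟨t, ht, hlt, heq⟩
  · exact Or.inl h
  · right
    unfold pvL at ht
    obtain ⟨i, hi, hmem⟩ := List.mem_flatMap.mp ht
    obtain ⟨j, hjf, hteq⟩ := List.mem_map.mp hmem
    obtain ⟨hjr, _⟩ := List.mem_filter.mp hjf
    have hi' := List.mem_range'_1.mp hi
    have hj' := List.mem_range'_1.mp hjr
    refine ⟨i, j, by omega, by omega, by omega, by omega, ?_, ?_⟩
    · have : t.2.2 = pvR a b alo blo i j := by rw [← hteq]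
      omega
    · rw [heq, ← hteq]

theorem pvExtLeft_noop (a b : List String) (alo ahi blo bhi : Nat) (hblo : blo ≤ bhi)
    (bi bj k : Nat) (hfb : pvFlmB a b alo ahi blo bhi = (bi, bj, k)) :
    pvExtLeft a b alo blo bi bj k = (bi, bj, k) := by
  rw [pvExtLeft]
  rw [if_neg]
  rintro ⟨h1, h2, h3⟩
  rcases pvFlmB_I2 a b alo ahi blo bhi hblo with hc | ⟨i, j, hi1, hi2, hj1, hj2, hk, heq⟩
  · have h' : bi = alo ∧ bj = blo ∧ k = 0 := by
      have := hfb.symm.trans hc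
      simpa [Prod.ext_iff] using this
    omega
  · have h' : bi = i + 1 - pvR a b alo blo i j ∧ bj = j + 1 - pvR a b alo blo i j ∧
        k = pvR a b alo blo i j := by
      have := hfb.symm.trans heq
      simpa [Prod.ext_iff] using this
    obtain ⟨e1, e2, e3⟩ := h'
    have halo : alo + k ≤ i := by omega
    have hblo2 : blo + k ≤ j := by omega
    have hchain : ∀ t, t ≤ k → a.getD (i - t) "" = b.getD (j - t) "" := by
      intro t ht
      rcases Nat.lt_or_ge t k with h | h
      · exact pvR_run a b alo blo i j t (by omega)
      · have hte : t = k := by omega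
        subst hte
        rw [show i - t = bi - 1 from by omega, show j - t = bj - 1 from by omega]
        exact h3
    have := pvR_ge a b alo blo k i j halo hblo2 hchain
    omega

theorem pvExtRight_noop (a b : List String) (alo ahi blo bhi : Nat) (hblo : blo ≤ bhi)
    (bi bj k : Nat) (hfb : pvFlmB a b alo ahi blo bhi = (bi, bj, k)) :
    pvExtRight a b ahi bhi bi bj k = (bi, bj, k) := by
  rw [pvExtRight]
  rw [if_neg]
  rintro ⟨h1, h2, h3⟩
  rcases pvFlmB_I2 a b alo ahi blo bhi hblo with hc | ⟨i, j, hi1, hi2, hj1, hj2, hk, heq⟩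
  · have h' : bi = alo ∧ bj = blo ∧ k = 0 := by
      have := hfb.symm.trans hc
      simpa [Prod.ext_iff] using this
    obtain ⟨e1, e2, e3⟩ := h'
    subst e3
    have hge : 0 + 1 ≤ pvR a b alo blo alo blo := by
      refine pvR_ge a b alo blo 0 alo blo (by omega) (by omega) ?_
      intro t ht
      have hte : t = 0 := by omega
      subst hte
      rw [show alo - 0 = bi + 0 from by omega, show blo - 0 = bj + 0 from by omega]
      exact h3
    have hle := pvFlmB_I1 a b alo ahi blo bhi hblo alo blo (le_refl _) (by omega)
      (le_refl _) (by omega)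
    rw [hfb] at hle
    simp at hle
    omega
  · have h' : bi = i + 1 - pvR a b alo blo i j ∧ bj = j + 1 - pvR a b alo blo i j ∧
        k = pvR a b alo blo i j := by
      have := hfb.symm.trans heq
      simpa [Prod.ext_iff] using this
    obtain ⟨e1, e2, e3⟩ := h'
    have hkle1 : alo + k ≤ i + 1 := by
      rw [e3]
      exact pvR_le_left a b alo blo i j hi1
    have hkle2 : blo + k ≤ j + 1 := by
      rw [e3]
      exact pvR_le_right a b alo blo i j hj1
    have eb1 : bi + k = i + 1 := by omega
    have eb2 : bj + k = j + 1 := by omega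
    have hchain : ∀ t, t ≤ k → a.getD (i + 1 - t) "" = b.getD (j + 1 - t) "" := by
      intro t ht
      cases t with
      | zero =>
        rw [show i + 1 - 0 = bi + k from by omega, show j + 1 - 0 = bj + k from by omega]
        exact h3
      | succ t =>
        rw [show i + 1 - (t + 1) = i - t from by omega,
            show j + 1 - (t + 1) = j - t from by omega]
        exact pvR_run a b alo blo i j t (by omega)
    have hge := pvR_ge a b alo blo k (i + 1) (j + 1) (by omega) (by omega) hchain
    have hle := pvFlmB_I1 a b alo ahi blo bhi hblo (i + 1) (j + 1) (by omega) (by omega)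
      (by omega) (by omega)
    rw [hfb] at hle
    simp at hle
    omega

theorem pvFlm_eq_pvFlmB (a b : List String) (alo ahi blo bhi : Nat)
    (hblo : blo ≤ bhi) (hb : bhi ≤ b.length) :
    pvFlm a b (pvB2j b) alo ahi blo bhi = pvFlmB a b alo ahi blo bhi := by
  have hfold : ((List.range' alo (ahi - alo)).foldl
      (fun (st : PySem.Dict Nat Nat × Nat × Nat × Nat) i =>
        pvFlmInner blo bhi i st.1 ((pvB2j b).getD (a.getD i "") []) (PySem.Dict.empty, st.2))
      (PySem.Dict.empty, alo, blo, 0)).2 = pvFlmB a b alo ahi blo bhi := by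
    rw [pvFlmB_char a b alo ahi blo bhi hblo]
    rw [pvFlm_fold_char a b alo blo bhi hblo hb (ahi - alo) alo (le_refl _)
      PySem.Dict.empty (alo, blo, 0)
      (by intro j _ _; rw [if_neg (lt_irrefl alo)]; rfl)
      (by intro j hj; exact absurd rfl hj)]
    rfl
  rcases hfb : pvFlmB a b alo ahi blo bhi with ⟨bi, bj, k⟩
  rw [hfb] at hfold
  have hleft := pvExtLeft_noop a b alo ahi blo bhi hblo bi bj k hfb
  have hright := pvExtRight_noop a b alo ahi blo bhi hblo bi bj k hfb
  simp only [pvFlm, hfold, hleft, hright]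

theorem pvFlmB_bounds_pos (a b : List String) (alo ahi blo bhi : Nat) (hblo : blo ≤ bhi)
    (h : 0 < (pvFlmB a b alo ahi blo bhi).2.2) :
    alo ≤ (pvFlmB a b alo ahi blo bhi).1 ∧
    (pvFlmB a b alo ahi blo bhi).1 + (pvFlmB a b alo ahi blo bhi).2.2 ≤ ahi ∧
    blo ≤ (pvFlmB a b alo ahi blo bhi).2.1 ∧
    (pvFlmB a b alo ahi blo bhi).2.1 + (pvFlmB a b alo ahi blo bhi).2.2 ≤ bhi := by
  rcases pvFlmB_I2 a b alo ahi blo bhi hblo with hc | ⟨i, j, hi1, hi2, hj1, hj2, hk, heq⟩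
  · rw [hc] at h
    simp at h
  · have hkle1 := pvR_le_left a b alo blo i j hi1
    have hkle2 := pvR_le_right a b alo blo i j hj1
    rw [heq]
    simp only
    omega

-- ---- the divide-and-conquer parts of the sparse matcher (proof-side mirror of B) ----

def pvParts (a b : List String) (b2j : PySem.Dict String (List Nat)) :
    Nat → Nat → Nat → Nat → Nat → List String
  | 0, _, _, blo, bhi =>
    if blo < bhi then
      [PySem.Str.join " " (PySem.List.slice b (some (blo : Int)) (some (bhi : Int)))] else []
  | fuel + 1, alo, ahi, blo, bhi =>
    let m := pvFlm a b b2j alo ahi blo bhi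
    if m.2.2 = 0 then
      if blo < bhi then
        [PySem.Str.join " " (PySem.List.slice b (some (blo : Int)) (some (bhi : Int)))] else []
    else
      pvParts a b b2j fuel alo m.1 blo m.2.1 ++
      pvParts a b b2j fuel (m.1 + m.2.2) ahi (m.2.1 + m.2.2) bhi

theorem pvParts_eq_pvPartsB (a b : List String) :
    ∀ (fuel alo ahi blo bhi : Nat), blo ≤ bhi → bhi ≤ b.length →
      pvParts a b (pvB2j b) fuel alo ahi blo bhi = pvPartsB a b fuel alo ahi blo bhi := by
  intro fuel
  induction fuel with
  | zero => intro alo ahi blo bhi _ _; rfl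
  | succ f ih =>
    intro alo ahi blo bhi hblo hb
    have hflm := pvFlm_eq_pvFlmB a b alo ahi blo bhi hblo hb
    rcases hfb : pvFlmB a b alo ahi blo bhi with ⟨bi, bj, k⟩
    rw [hfb] at hflm
    simp only [pvParts, pvPartsB, hflm, hfb]
    by_cases hk : k = 0
    · subst hk
      simp
    · simp only [if_neg hk]
      have hbnd := pvFlmB_bounds_pos a b alo ahi blo bhi hblo (by rw [hfb]; simp; omega)
      rw [hfb] at hbnd
      simp only at hbnd
      obtain ⟨hb1, hb2, hb3, hb4⟩ := hbnd
      rw [ih alo bi blo bj hb3 (by omega), ih (bi + k) ahi (bj + k) bhi (by omega) hb]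

-- ---- A's pipeline extracts the gaps between the matching blocks (as before) ----

-- the (possibly empty) changed phrase of the b-range [p, q)
def pvGap (b : List String) (p q : Nat) : List String :=
  if p < q then [PySem.Str.join " " (PySem.List.slice b (some (p : Int)) (some (q : Int)))] else []

-- the phrases A's pipeline extracts from a block list, as a function of the running prev_j
def pvGaps (b : List String) : List (Nat × Nat × Nat) → Nat → List String
  | [], _ => []
  | (_, bj, sz) :: rest, prev => pvGap b prev bj ++ pvGaps b rest (bj + sz)

theorem pvDiffParts_append (b : List String) :
    ∀ (l1 l2 : List (String × Nat × Nat × Nat × Nat)),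
      pvDiffParts b (l1 ++ l2) = pvDiffParts b l1 ++ pvDiffParts b l2 := by
  intro l1 l2
  induction l1 with
  | nil => rfl
  | cons p rest ih =>
    obtain ⟨t, i1, i2, j1, j2⟩ := p
    simp only [List.cons_append, pvDiffParts, ih, List.append_assoc]

-- A's opcodes-then-filter pass extracts exactly the non-empty b-gaps between the blocks:
-- an opcode is "insert"/"replace" iff the running j is strictly below the block's bj
theorem pvDiffParts_opcodes (b : List String) :
    ∀ (blocks : List (Nat × Nat × Nat)) (i j : Nat),
      pvDiffParts b (pvOpcodes blocks i j) = pvGaps b blocks j := by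
  intro blocks
  induction blocks with
  | nil => intro i j; rfl
  | cons blk rest ih =>
    intro i j
    obtain ⟨ai, bj, size⟩ := blk
    simp only [pvOpcodes, pvGaps]
    rw [pvDiffParts_append, pvDiffParts_append, ih (ai + size) (bj + size)]
    have he : pvDiffParts b
        (if size ≠ 0 then [("equal", ai, ai + size, bj, bj + size)] else []) = [] := by
      split <;> simp [pvDiffParts]
    rw [he]
    simp only [List.append_nil]
    congr 1
    by_cases hj : j < bj <;> by_cases hi : i < ai
    · rw [show (if i < ai ∧ j < bj then "replace" else if i < ai then "delete"
            else if j < bj then "insert" else "") = "replace" from by simp [hi, hj]]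
      simp [pvDiffParts, pvGap, hj]
    · rw [show (if i < ai ∧ j < bj then "replace" else if i < ai then "delete"
            else if j < bj then "insert" else "") = "insert" from by simp [hi, hj]]
      simp [pvDiffParts, pvGap, hj]
    · rw [show (if i < ai ∧ j < bj then "replace" else if i < ai then "delete"
            else if j < bj then "insert" else "") = "delete" from by simp [hi, hj]]
      simp [pvDiffParts, pvGap, hj]
    · rw [show (if i < ai ∧ j < bj then "replace" else if i < ai then "delete"
            else if j < bj then "insert" else "") = "" from by simp [hi, hj]]
      simp [pvDiffParts, pvGap, hj]

-- splitting the gap walk at a block: everything after (i,j,k) starts from prev_j = j + k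
theorem pvGaps_split (b : List String) :
    ∀ (L : List (Nat × Nat × Nat)) (rest : List (Nat × Nat × Nat)) (prev i j k : Nat),
      pvGaps b (L ++ (i, j, k) :: rest) prev
        = pvGaps b (L ++ [(i, j, 0)]) prev ++ pvGaps b rest (j + k) := by
  intro L
  induction L with
  | nil => intro rest prev i j k; simp [pvGaps]
  | cons blk L ih =>
    intro rest prev i j k
    obtain ⟨ai, bj, sz⟩ := blk
    simp only [List.cons_append, pvGaps]
    rw [ih]
    simp [List.append_assoc]

-- every block pvMB emits has a non-zero size
theorem pvMB_size_ne_zero (a b : List String) (d : PySem.Dict String (List Nat)) :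
    ∀ (f alo ahi blo bhi : Nat) (t : Nat × Nat × Nat),
      t ∈ pvMB a b d f alo ahi blo bhi → t.2.2 ≠ 0 := by
  intro f
  induction f with
  | zero => intro alo ahi blo bhi t ht; simp [pvMB] at ht
  | succ f ih =>
    intro alo ahi blo bhi t ht
    simp only [pvMB] at ht
    split at ht
    · simp at ht
    · rename_i hk
      simp only [List.append_assoc, List.mem_append, List.mem_singleton] at ht
      rcases ht with h1 | h2 | h3
      · split at h1
        · exact ih _ _ _ _ _ h1
        · simp at h1
      · subst h2; exact hk
      · split at h3
        · exact ih _ _ _ _ _ h3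
        · simp at h3

-- merging adjacent blocks does not change the extracted gaps
theorem pvGaps_collapse (b : List String) :
    ∀ (l : List (Nat × Nat × Nat)) (i1 j1 k1 prev : Nat) (tail : List (Nat × Nat × Nat)),
      (∀ t ∈ l, t.2.2 ≠ 0) → (k1 = 0 → j1 = prev) →
      pvGaps b (pvCollapse l i1 j1 k1 ++ tail) prev
        = pvGaps b ((i1, j1, k1) :: (l ++ tail)) prev := by
  intro l
  induction l with
  | nil =>
    intro i1 j1 k1 prev tail _ hk
    by_cases h : k1 = 0
    · subst h
      simp [pvCollapse, pvGaps, pvGap, hk rfl]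
    · simp [pvCollapse, h, pvGaps]
  | cons blk rest ih =>
    intro i1 j1 k1 prev tail hall hk
    obtain ⟨i2, j2, k2⟩ := blk
    have hk2 : k2 ≠ 0 := hall (i2, j2, k2) (List.mem_cons_self ..)
    have hrest : ∀ t ∈ rest, t.2.2 ≠ 0 := fun t ht => hall t (List.mem_cons_of_mem _ ht)
    simp only [pvCollapse]
    split
    · rename_i hadj
      obtain ⟨hadj1, hadj2⟩ := hadj
      rw [ih i1 j1 (k1 + k2) prev tail hrest (by omega)]
      simp only [pvGaps, List.cons_append]
      rw [← hadj2]
      have hgap : pvGap b (j1 + k1) (j1 + k1) = [] := by simp [pvGap]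
      simp [hgap, Nat.add_assoc]
    · by_cases h : k1 = 0
      · subst h
        have hj : j1 = prev := hk rfl
        subst hj
        rw [if_neg (by simp), List.nil_append,
            ih i2 j2 k2 j1 tail hrest (fun h0 => absurd h0 hk2)]
        simp [pvGaps, pvGap]
      · rw [if_pos h]
        have hsh : (([(i1, j1, k1)] ++ pvCollapse rest i2 j2 k2) ++ tail : List (Nat × Nat × Nat))
            = (i1, j1, k1) :: (pvCollapse rest i2 j2 k2 ++ tail) := by simp
        rw [hsh]
        simp only [pvGaps]
        rw [ih i2 j2 k2 (j1 + k1) tail hrest (fun h0 => absurd h0 hk2)]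
        simp [pvGaps, List.cons_append]

-- an empty search range contributes nothing in the inner scan
theorem pvFlmInner_empty_range (blo bhi i : Nat) (d : PySem.Dict Nat Nat)
    (h : bhi ≤ blo) : ∀ (l : List Nat) (st : PySem.Dict Nat Nat × Nat × Nat × Nat),
      pvFlmInner blo bhi i d l st = st := by
  intro l
  induction l with
  | nil => intro st; rfl
  | cons j rest ih =>
    intro st
    simp only [pvFlmInner]
    split
    · exact ih st
    · rw [if_pos (by omega)]

-- find_longest_match on an empty a- or b-range returns (alo, blo, 0)
theorem pvFlm_empty (a b : List String) (d : PySem.Dict String (List Nat))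
    (alo ahi blo bhi : Nat) (h : ahi ≤ alo ∨ bhi ≤ blo) :
    pvFlm a b d alo ahi blo bhi = (alo, blo, 0) := by
  have hfold : ((List.range' alo (ahi - alo)).foldl
      (fun (st : PySem.Dict Nat Nat × Nat × Nat × Nat) i =>
        pvFlmInner blo bhi i st.1 (d.getD (a.getD i "") []) (PySem.Dict.empty, st.2))
      (PySem.Dict.empty, alo, blo, 0)).2 = (alo, blo, 0) := by
    rcases h with h | h
    · rw [show ahi - alo = 0 by omega]
      rfl
    · have key : ∀ (l : List Nat) (st : PySem.Dict Nat Nat × Nat × Nat × Nat),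
          (l.foldl (fun (st : PySem.Dict Nat Nat × Nat × Nat × Nat) i =>
            pvFlmInner blo bhi i st.1 (d.getD (a.getD i "") []) (PySem.Dict.empty, st.2)) st).2
          = st.2 := by
        intro l
        induction l with
        | nil => intro st; rfl
        | cons i rest ih =>
          intro st
          rw [List.foldl_cons, ih, pvFlmInner_empty_range blo bhi i st.1 h]
      exact key _ _
  have hleft : pvExtLeft a b alo blo alo blo 0 = (alo, blo, 0) := by
    rw [pvExtLeft]
    rw [if_neg (by omega)]
  have hright : pvExtRight a b ahi bhi alo blo 0 = (alo, blo, 0) := by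
    rw [pvExtRight]
    rw [if_neg (by omega)]
  simp only [pvFlm, hfold, hleft, hright]

-- the divide-and-conquer recursion on an empty a- or b-range reduces to the single gap
theorem pvParts_empty (a b : List String) (d : PySem.Dict String (List Nat)) :
    ∀ (f alo ahi blo bhi : Nat), (ahi ≤ alo ∨ bhi ≤ blo) →
      pvParts a b d f alo ahi blo bhi = pvGap b blo bhi := by
  intro f alo ahi blo bhi h
  cases f with
  | zero => rfl
  | succ f => simp [pvParts, pvFlm_empty a b d alo ahi blo bhi h, pvGap]

-- the gaps of pvMB's block list (closed at bhi by the following block) are the parts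
theorem pvGaps_pvMB (a b : List String) (d : PySem.Dict String (List Nat)) :
    ∀ (f alo ahi blo bhi x s : Nat),
      pvGaps b (pvMB a b d f alo ahi blo bhi ++ [(x, bhi, s)]) blo
        = pvParts a b d f alo ahi blo bhi := by
  intro f
  induction f with
  | zero => intro alo ahi blo bhi x s; simp [pvMB, pvParts, pvGaps, pvGap]
  | succ f ih =>
    intro alo ahi blo bhi x s
    rcases hm : pvFlm a b d alo ahi blo bhi with ⟨i, j, k⟩
    by_cases hk : k = 0
    · subst hk
      simp [pvMB, pvParts, hm, pvGaps, pvGap]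
    · have hMB : pvMB a b d (f + 1) alo ahi blo bhi
          = (if alo < i ∧ blo < j then pvMB a b d f alo i blo j else []) ++
            [(i, j, k)] ++
            (if i + k < ahi ∧ j + k < bhi then pvMB a b d f (i + k) ahi (j + k) bhi else []) := by
        simp [pvMB, hm, hk]
      have hP : pvParts a b d (f + 1) alo ahi blo bhi
          = pvParts a b d f alo i blo j ++ pvParts a b d f (i + k) ahi (j + k) bhi := by
        simp [pvParts, hm, hk]
      rw [hMB, hP]
      have hassoc : ((if alo < i ∧ blo < j then pvMB a b d f alo i blo j else []) ++
            [(i, j, k)] ++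
            (if i + k < ahi ∧ j + k < bhi then pvMB a b d f (i + k) ahi (j + k) bhi else []))
            ++ [(x, bhi, s)]
          = (if alo < i ∧ blo < j then pvMB a b d f alo i blo j else []) ++
            ((i, j, k) ::
              ((if i + k < ahi ∧ j + k < bhi then pvMB a b d f (i + k) ahi (j + k) bhi else [])
                ++ [(x, bhi, s)])) := by simp
      rw [hassoc, pvGaps_split]
      congr 1
      · by_cases hc : alo < i ∧ blo < j
        · rw [if_pos hc, ih alo i blo j i 0]
        · rw [if_neg hc, List.nil_append,
              pvParts_empty a b d f alo i blo j (by omega)]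
          simp [pvGaps, pvGap]
      · by_cases hc : i + k < ahi ∧ j + k < bhi
        · rw [if_pos hc, ih (i + k) ahi (j + k) bhi x s]
        · rw [if_neg hc, List.nil_append,
              pvParts_empty a b d f (i + k) ahi (j + k) bhi (by omega)]
          simp [pvGaps, pvGap]

-- ===== VERDICT (by name: the statement is the Claim_ definition above) =====
theorem extract_diff_phrases_py_spec : Claim_equal_extract_diff_phrases_py := by
  intro earlier later _
  unfold Spec_extract_diff_phrases_py extract_diff_phrases_py extract_diff_phrases_py_alt
  dsimp only
  set a := PySem.Str.split₀ earlier with ha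
  set b := PySem.Str.split₀ later with hb
  congr 1
  rw [pvDiffParts_opcodes b (pvMatchingBlocks a b) 0 0]
  unfold pvMatchingBlocks
  rw [pvGaps_collapse b _ 0 0 0 0 [(a.length, b.length, 0)]
        (pvMB_size_ne_zero a b (pvB2j b) _ 0 a.length 0 b.length) (fun _ => rfl)]
  show pvGap b 0 0 ++ pvGaps b _ 0 = _
  rw [show pvGap b 0 0 = [] from rfl, List.nil_append]
  rw [pvGaps_pvMB a b (pvB2j b) (a.length + b.length + 1) 0 a.length 0 b.length a.length 0]
  exact pvParts_eq_pvPartsB a b (a.length + b.length + 1) 0 a.length 0 b.length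
    (Nat.zero_le _) (le_refl _)
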